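-- pv_equiv track=rewrite | github.com/rahulwadate21/onlinesales | debug.py | compute
-- ===== SOURCE A (Python) =====
-- def compute(n):
--     if n < 10:
--         out = n ** 2
--     elif n < 20:
--         out = 1
--         for i in range(1, n-9):  # Changed n-10 to n-9 to calculate factorial correctly
--             out *= i
--     else:
--         lim = n - 20
--         out = 0  # Initialize out as 0 to calculate sum correctly
--         for i in range(1, lim+1):  # Added +1 to include lim in the range
--             out += i
--
--     return out
-- ===== SOURCE B (Python) =====
-- def compute(n):
--     if n < 10:
--         return n * n
--     if n < 20:
--         def fact(k):
--             return 1 if k <= 1 else k * fact(k - 1)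
--         return fact(n - 10)
--     lim = n - 20
--     return lim * (lim + 1) // 2
-- ===== Notes on version B (the rewrite author's own statement) =====
-- stated objective: faster
-- what changed: replaces A's accumulation loops with a direct square, a recursive factorial, and the Gauss closed form for the sum branch
import Mathlib
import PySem

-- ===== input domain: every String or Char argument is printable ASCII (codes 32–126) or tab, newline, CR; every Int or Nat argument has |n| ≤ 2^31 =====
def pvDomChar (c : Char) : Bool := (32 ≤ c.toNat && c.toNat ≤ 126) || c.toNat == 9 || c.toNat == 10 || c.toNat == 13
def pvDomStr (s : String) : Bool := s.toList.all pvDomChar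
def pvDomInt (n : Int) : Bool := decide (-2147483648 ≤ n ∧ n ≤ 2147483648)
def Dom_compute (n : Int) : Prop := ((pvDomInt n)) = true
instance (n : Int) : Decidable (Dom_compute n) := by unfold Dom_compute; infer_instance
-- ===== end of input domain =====

-- B replaces A's accumulation loops with a recursive factorial and the closed-form Gauss sum (faster in the sum branch).


-- ===== PORT A =====
def compute (n : Int) : Int :=
  if n < 10 then
    n ^ 2
  else if n < 20 then
    (PySem.List.pyRange 1 (n - 9) 1).foldl (fun out i => out * i) 1
  else
    let lim := n - 20
    (PySem.List.pyRange 1 (lim + 1) 1).foldl (fun out i => out + i) 0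

-- ===== PORT B =====
def computeAltFact (k : Int) : Int :=
  if k ≤ 1 then 1 else k * computeAltFact (k - 1)
termination_by k.toNat
decreasing_by
  omega

def compute_alt (n : Int) : Int :=
  if n < 10 then
    n * n
  else if n < 20 then
    computeAltFact (n - 10)
  else
    let lim := n - 20
    PySem.Int.floordiv (lim * (lim + 1)) 2

-- ===== PRECONDITION & SPEC =====
def Spec_compute (n : Int) (out : Int) : Prop := out = compute_alt n
instance (n : Int) (out : Int) : Decidable (Spec_compute n out) := by unfold Spec_compute; infer_instance

-- ===== CLAIM (what is proved, stated in full; the proofs are below) =====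
def Claim_equal_compute : Prop := ∀ (n : Int), Dom_compute n → Spec_compute n (compute n)

-- ===== LEMMAS AND PROOFS =====

-- sum 1..m by the loop equals the Gauss closed form (m ≥ 0)
theorem sum_pyRange_gauss (m : Int) (hm : 0 ≤ m) :
    (PySem.List.pyRange 1 (m + 1) 1).foldl (fun out i => out + i) 0
      = PySem.Int.floordiv (m * (m + 1)) 2 := by
  have hfd : PySem.Int.floordiv (m * (m + 1)) 2 = m * (m + 1) / 2 := by
    show (m * (m + 1)).fdiv 2 = m * (m + 1) / 2
    rw [Int.fdiv_eq_ediv]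
    norm_num
  rw [hfd]
  have key : ∀ (k : Nat), (PySem.List.pyRange 1 ((k : Int) + 1) 1).foldl (fun out i => out + i) 0
      = (k : Int) * ((k : Int) + 1) / 2 := by
    intro k
    induction k with
    | zero => simp [PySem.List.pyRange_one_eq_nil]
    | succ j ih =>
      have h1 : (1 : Int) ≤ (j : Int) + 1 := by omega
      rw [show ((j + 1 : Nat) : Int) + 1 = ((j : Int) + 1) + 1 by push_cast; ring,
        PySem.List.pyRange_one_succ_right h1, List.foldl_append, ih]
      simp only [List.foldl]
      push_cast
      rw [show ((j : Int) + 1) * ((j : Int) + 1 + 1) = (j : Int) * ((j : Int) + 1) + ((j : Int) + 1) * 2 by ring,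
        Int.add_mul_ediv_right _ _ (by norm_num : (2 : Int) ≠ 0)]
  obtain ⟨k, rfl⟩ := Int.eq_ofNat_of_zero_le hm
  exact key k

-- the factorial loop equals B's recursive factorial (m ≥ 0)
theorem prod_pyRange_fact (m : Int) (hm : 0 ≤ m) :
    (PySem.List.pyRange 1 (m + 1) 1).foldl (fun out i => out * i) 1 = computeAltFact m := by
  have key : ∀ (k : Nat), (PySem.List.pyRange 1 ((k : Int) + 1) 1).foldl (fun out i => out * i) 1
      = computeAltFact (k : Int) := by
    intro k
    induction k with
    | zero => simp [PySem.List.pyRange_one_eq_nil, computeAltFact]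
    | succ j ih =>
      have h1 : (1 : Int) ≤ (j : Int) + 1 := by omega
      rw [show ((j + 1 : Nat) : Int) + 1 = ((j : Int) + 1) + 1 by push_cast; ring,
        PySem.List.pyRange_one_succ_right h1, List.foldl_append, ih]
      simp only [List.foldl]
      push_cast
      conv_rhs => rw [computeAltFact]
      by_cases hj0 : j = 0
      · subst hj0
        rw [if_pos (by norm_num), computeAltFact]
        norm_num
      · rw [if_neg (by omega : ¬ ((j : Int) + 1 ≤ 1))]
        rw [show ((j : Int) + 1 - 1) = (j : Int) by ring]
        ring
  obtain ⟨k, rfl⟩ := Int.eq_ofNat_of_zero_le hm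
  exact key k

theorem compute_spec : Claim_equal_compute := by
  intro n _
  unfold Spec_compute compute compute_alt
  by_cases h1 : n < 10
  · simp only [h1, if_true]; ring
  · simp only [h1, if_false]
    by_cases h2 : n < 20
    · simp only [h2, if_true]
      have := prod_pyRange_fact (n - 10) (by omega)
      rw [show (n - 9 : Int) = (n - 10) + 1 by ring]
      exact this
    · simp only [h2, if_false]
      exact sum_pyRange_gauss (n - 20) (by omega)
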